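-- pv_equiv track=rewrite | github.com/apfejes/epigenetics-software | Epigenetics/WaveGenerator/Utilities/MapDecomposingThread.py | get_mu
-- ===== SOURCE A (Python) =====
-- def get_mu(testing):
--     '''returns the best mu from the possible list'''
--     start = 0
--     end = 0
--     height = -1    # this is actually the best sigma value
--     best_height = height
--     best_pos = 0
--
--     for t in testing:
--         if t[1] > height:
--             start = t[0]
--             end = start
--             height = t[1]
--         elif t[1] == height:
--             end = t[0]
--         elif t[1] < height:
--             if height > best_height:
--                 best_height = height
--                 best_pos = int((end - start) / 2) + start
--             height = t[1]
--             start = t[0]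
--     if height > best_height:
--         best_height = height
--         best_pos = int((end - start) / 2) + start
--
--     if best_height <= 1:
--         # print "get_mu found no reasonable sigmas"
--         return None, None
--     else :
--         # print "best_height = ", best_height
--         # print "pos = ", best_pos
--         return best_pos, best_height
-- ===== SOURCE B (Python) =====
-- def get_mu(testing):
--     '''returns the best mu from the possible list'''
--     best = max((t[1] for t in testing), default=-1)
--     if best <= 1:
--         return None, None
--     i = 0
--     while testing[i][1] != best:
--         i += 1
--     start = testing[i][0]
--     end = start
--     j = i + 1
--     while j < len(testing) and testing[j][1] == best:
--         end = testing[j][0]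
--         j += 1
--     return int((end - start) / 2) + start, best
-- ===== Notes on version B (the rewrite author's own statement) =====
-- stated objective: simpler
-- what changed: Replaced A's single-pass five-variable plateau state machine (with deferred best-run bookkeeping and a final flush) by a two-pass decomposition: one pass computes the maximum height, a second locates the first contiguous run of that height and returns its midpoint.
import Mathlib
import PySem

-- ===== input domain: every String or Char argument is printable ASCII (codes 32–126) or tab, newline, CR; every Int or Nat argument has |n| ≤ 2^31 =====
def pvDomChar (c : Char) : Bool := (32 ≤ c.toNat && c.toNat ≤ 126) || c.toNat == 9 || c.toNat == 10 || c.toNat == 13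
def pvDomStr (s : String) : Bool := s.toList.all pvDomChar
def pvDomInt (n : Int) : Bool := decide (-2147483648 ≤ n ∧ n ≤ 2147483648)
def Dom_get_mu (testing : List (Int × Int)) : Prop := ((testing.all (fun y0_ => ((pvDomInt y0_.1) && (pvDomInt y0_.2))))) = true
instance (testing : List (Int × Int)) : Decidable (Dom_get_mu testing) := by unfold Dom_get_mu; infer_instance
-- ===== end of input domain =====

-- B replaces A's single-pass plateau state machine by a two-pass decomposition
-- (compute the maximum, then locate the first maximal run); objective: simpler, same O(n) cost.

-- ===== PORT A =====
-- the loop body of A; state = (start, end, height, best_height, best_pos)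
-- int((end-start)/2) is exact truncating division on |n| ≤ 2^31 inputs → Int.tdiv
def pvStepA (s : Int × Int × Int × Int × Int) (t : Int × Int) : Int × Int × Int × Int × Int :=
  match s with
  | (start, end_, height, best_height, best_pos) =>
    if t.2 > height then (t.1, t.1, t.2, best_height, best_pos)
    else if t.2 = height then (start, t.1, height, best_height, best_pos)
    else if height > best_height then
      (t.1, end_, t.2, height, Int.tdiv (end_ - start) 2 + start)
    else (t.1, end_, t.2, best_height, best_pos)

def get_mu (testing : List (Int × Int)) : Option Int × Option Int :=
  match testing.foldl pvStepA (0, 0, -1, -1, 0) with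
  | (start, end_, height, best_height, best_pos) =>
    let bb : Int × Int :=
      if height > best_height then (height, Int.tdiv (end_ - start) 2 + start)
      else (best_height, best_pos)
    if bb.1 ≤ 1 then (none, none) else (some bb.2, some bb.1)

-- ===== PORT B =====
-- B's second inner while-loop: extend the run of value `best`, returning the last run position
def pvRunEnd (e best : Int) : List (Int × Int) → Int
  | [] => e
  | t :: rest => if t.2 = best then pvRunEnd t.1 best rest else e

-- B's first while-loop (find first position with value `best`) fused with the run extension
def pvLocate (best : Int) : List (Int × Int) → Option (Int × Int)
  | [] => none
  | t :: rest => if t.2 = best then some (t.1, pvRunEnd t.1 best rest) else pvLocate best rest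

def get_mu_alt (testing : List (Int × Int)) : Option Int × Option Int :=
  let best := testing.foldl (fun m t => max m t.2) (-1)
  if best ≤ 1 then (none, none)
  else
    match pvLocate best testing with
    | some (s, e) => (some (Int.tdiv (e - s) 2 + s), some best)
    | none => (none, none)   -- unreachable: best > -1 is attained by some element

-- ===== PRECONDITION & SPEC =====
def Spec_get_mu (testing : List (Int × Int)) (out : Option Int × Option Int) : Prop := out = get_mu_alt testing
instance (testing : List (Int × Int)) (out : Option Int × Option Int) : Decidable (Spec_get_mu testing out) := by unfold Spec_get_mu; infer_instance

-- ===== CLAIM (what is proved, stated in full; the proofs are below) =====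
def Claim_equal_get_mu : Prop := ∀ (testing : List (Int × Int)), Dom_get_mu testing → Spec_get_mu testing (get_mu testing)

-- ===== LEMMAS AND PROOFS =====

-- closing step of A, applied to the fold's final state
def pvFinish (s : Int × Int × Int × Int × Int) : Int × Int :=
  match s with
  | (start, end_, height, best_height, best_pos) =>
    if height > best_height then (height, Int.tdiv (end_ - start) 2 + start)
    else (best_height, best_pos)

-- what B computes from an intermediate state, as a function of the remaining list
def pvRHS (l : List (Int × Int)) (st en h bh bp : Int) : Int × Int :=
  let m := l.foldl (fun m t => max m t.2) h
  if bh ≥ m then (bh, bp)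
  else if h = m then (h, Int.tdiv (pvRunEnd en h l - st) 2 + st)
  else match pvLocate m l with
       | some (s, e) => (m, Int.tdiv (e - s) 2 + s)
       | none => (m, 0)

theorem pv_foldl_max_max (l : List (Int × Int)) : ∀ a b : Int,
    l.foldl (fun m t => max m t.2) (max a b) = max a (l.foldl (fun m t => max m t.2) b) := by
  induction l with
  | nil => intro a b; rfl
  | cons t rest ih =>
      intro a b
      simp only [List.foldl_cons, max_assoc]
      exact ih a (max b t.2)

theorem pv_le_foldl_max (l : List (Int × Int)) : ∀ a : Int,
    a ≤ l.foldl (fun m t => max m t.2) a := by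
  induction l with
  | nil => intro a; exact le_refl a
  | cons t rest ih =>
      intro a
      exact le_trans (le_max_left a t.2) (ih (max a t.2))

theorem pv_main (l : List (Int × Int)) : ∀ st en h bh bp : Int,
    pvFinish (l.foldl pvStepA (st, en, h, bh, bp)) = pvRHS l st en h bh bp := by
  induction l with
  | nil =>
      intro st en h bh bp
      simp only [List.foldl_nil, pvFinish, pvRHS, List.foldl_nil, pvRunEnd]
      split_ifs with h1 h2 <;> first | rfl | omega
  | cons t rest ih =>
      intro st en h bh bp
      simp only [List.foldl_cons, pvStepA, pvRHS, pvRunEnd, pvLocate]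
      by_cases hgt : t.2 > h
      · -- new higher plateau starts at t
        simp only [if_pos hgt]
        rw [ih]
        have hm : max h t.2 = t.2 := by omega
        have hmax := pv_le_foldl_max rest t.2
        simp only [pvRHS, hm]
        set m := rest.foldl (fun m t => max m t.2) t.2 with hmm
        by_cases h1 : bh ≥ m
        · simp only [if_pos h1]
        · simp only [if_neg h1, if_neg (by omega : ¬ h = m)]
          by_cases h2 : t.2 = m
          · simp only [← h2]
            simp
          · simp only [if_neg h2]
      · by_cases heq : t.2 = h
        · -- plateau continues
          simp only [if_neg hgt, if_pos heq]
          rw [ih]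
          have hm : max h t.2 = h := by omega
          simp only [pvRHS, hm]
          set m := rest.foldl (fun m t => max m t.2) h with hmm
          by_cases h1 : bh ≥ m
          · simp only [if_pos h1]
          · simp only [if_neg h1]
            by_cases h2 : h = m
            · simp only [if_pos h2]
            · have h3 : ¬ t.2 = m := by omega
              simp only [if_neg h2, if_neg h3]
        · -- descent
          have hlt : t.2 < h := by omega
          have hm : max h t.2 = h := by omega
          have key : rest.foldl (fun m t => max m t.2) h
              = max h (rest.foldl (fun m t => max m t.2) t.2) := by
            have := pv_foldl_max_max rest h t.2
            rw [hm] at this; exact this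
          set m' := rest.foldl (fun m t => max m t.2) t.2 with hmm
          have hbase : t.2 ≤ m' := pv_le_foldl_max rest t.2
          have hmle : h ≤ max h m' := le_max_left h m'
          have hmle2 : m' ≤ max h m' := le_max_right h m'
          have hmcases : max h m' = h ∨ max h m' = m' := max_choice h m'
          by_cases hcl : h > bh
          · simp only [if_neg hgt, if_neg heq, if_pos hcl]
            rw [ih]
            simp only [pvRHS, hm, key]
            by_cases hA : h ≥ m'
            · have e1 : max h m' = h := by omega
              simp only [e1, ← hmm, if_pos hA, if_neg (show ¬ bh ≥ h by omega), if_neg heq]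
              simp
            · have e1 : max h m' = m' := by omega
              simp only [e1, ← hmm, if_neg hA, if_neg (show ¬ t.2 = m' by omega),
                if_neg (show ¬ bh ≥ m' by omega), if_neg (show ¬ h = m' by omega)]
          · simp only [if_neg hgt, if_neg heq, if_neg hcl]
            rw [ih]
            simp only [pvRHS, hm, key]
            by_cases h1 : bh ≥ max h m'
            · simp only [← hmm, if_pos h1, if_pos (show bh ≥ m' by omega)]
            · have hA : ¬ h ≥ m' := by omega
              have e1 : max h m' = m' := by omega
              simp only [e1, ← hmm, if_neg (show ¬ bh ≥ m' by omega),
                if_neg (show ¬ h = m' by omega), if_neg (show ¬ t.2 = m' by omega)]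

theorem pv_locate_some (l : List (Int × Int)) : ∀ h : Int,
    h < l.foldl (fun m t => max m t.2) h →
    (pvLocate (l.foldl (fun m t => max m t.2) h) l).isSome := by
  induction l with
  | nil => intro h hh; simp at hh
  | cons t rest ih =>
      intro h hh
      simp only [List.foldl_cons] at hh ⊢
      by_cases he : t.2 = rest.foldl (fun m t => max m t.2) (max h t.2)
      · simp only [pvLocate, if_pos he, Option.isSome_some]
      · have hb := pv_le_foldl_max rest (max h t.2)
        simp only [pvLocate, if_neg he]
        exact ih (max h t.2) (by omega)

theorem pv_get_mu_eq (testing : List (Int × Int)) : get_mu testing = get_mu_alt testing := by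
  have hmain := pv_main testing 0 0 (-1) (-1) 0
  have hfin : get_mu testing =
      (let bb := pvFinish (testing.foldl pvStepA (0, 0, -1, -1, 0) )
       if bb.1 ≤ 1 then (none, none) else (some bb.2, some bb.1)) := by
    simp only [get_mu, pvFinish]
  rw [hfin, hmain]
  simp only [pvRHS, get_mu_alt]
  set m := testing.foldl (fun m t => max m t.2) (-1 : Int) with hm
  by_cases h1 : (-1 : Int) ≥ m
  · simp only [if_pos h1, if_pos (show m ≤ 1 by omega)]
    norm_num
  · by_cases h2 : (-1 : Int) = m
    · omega
    · simp only [if_neg h1, if_neg h2]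
      have hs := pv_locate_some testing (-1) (by omega)
      rw [← hm] at hs
      cases hloc : pvLocate m testing with
      | none => rw [hloc] at hs; simp at hs
      | some p =>
          cases p with
          | mk s e => rfl

-- ===== VERDICT (by name: the statement is the Claim_ definition above) =====
theorem get_mu_spec : Claim_equal_get_mu := by
  intro testing _
  unfold Spec_get_mu
  exact pv_get_mu_eq testing
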